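-- pv_equiv track=rewrite | github.com/Liwow/Constraint_Matters | model_test_SCIP.py | is_consecutive_x_vars
-- ===== SOURCE A (Python) =====
-- def is_consecutive_x_vars(var_names):
--     ids = []
--     for name in var_names:
--         if not name.startswith("x"):
--             return False
--         try:
--             idx = int(name[1:])
--             if idx >= 20:
--                 return False
--             ids.append(idx)
--         except:
--             return False
--     ids.sort()
--     return all(ids[i] + 1 == ids[i + 1] for i in range(len(ids) - 1))
-- ===== SOURCE B (Python) =====
-- def is_consecutive_x_vars(var_names):
--     seen = set()
--     lo = None
--     hi = None
--     for name in var_names: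
--         if not name.startswith("x"):
--             return False
--         try:
--             idx = int(name[1:])
--         except ValueError:
--             return False
--         if idx >= 20 or idx in seen:
--             return False
--         seen.add(idx)
--         if lo is None or idx < lo:
--             lo = idx
--         if hi is None or idx > hi:
--             hi = idx
--     if lo is None:
--         return True
--     return hi - lo + 1 == len(seen)
-- ===== Notes on version B (the rewrite author's own statement) =====
-- stated objective: alternative
-- what changed: Replaces A's collect-all-ids, sort, and adjacent-pairs scan by a single pass that maintains a seen-set and running min/max, rejecting duplicates on the fly and checking consecutiveness arithmetically (max - min + 1 == count) with no sort.
import Mathlib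
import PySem

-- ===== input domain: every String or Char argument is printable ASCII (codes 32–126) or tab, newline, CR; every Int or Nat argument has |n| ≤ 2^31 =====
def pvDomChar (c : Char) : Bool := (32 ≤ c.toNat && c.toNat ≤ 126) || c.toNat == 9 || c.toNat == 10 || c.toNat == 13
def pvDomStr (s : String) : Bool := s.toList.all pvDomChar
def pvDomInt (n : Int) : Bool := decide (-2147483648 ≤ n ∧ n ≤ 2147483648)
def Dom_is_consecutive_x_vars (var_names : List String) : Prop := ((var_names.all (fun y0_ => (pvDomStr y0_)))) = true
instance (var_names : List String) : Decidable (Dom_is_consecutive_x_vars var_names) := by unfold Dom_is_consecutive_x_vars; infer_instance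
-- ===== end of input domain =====

-- B replaces A's sort-then-adjacent-scan by a single pass maintaining a seen-set and running min/max
-- (consecutiveness checked arithmetically: max-min+1 == count); objective: alternative (no sort).

-- ===== PORT A =====
-- all(ids[i] + 1 == ids[i + 1] for i in range(len(ids) - 1)); indices are always in
-- range here, so pyGetD is exact.
def pvChkA (s : List Int) : Bool :=
  (PySem.List.pyRange 0 ((s.length : Int) - 1) 1).all
    (fun i => PySem.List.pyGetD s i 0 + 1 == PySem.List.pyGetD s (i + 1) 0)

-- the for-loop of A: early 'return False's, accumulating ids; bare 'except' catches
-- exactly the ValueError of int(name[1:]) (nothing else in the try can raise).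
def pvGoA : List String → List Int → Bool
  | [], ids => pvChkA (PySem.List.sorted ids (fun x => x) false)
  | name :: rest, ids =>
    if PySem.Str.startswith name "x" then
      match PySem.Int.ofStr? (PySem.Str.slice name (some 1) none) with
      | some idx => if idx ≥ 20 then false else pvGoA rest (ids ++ [idx])
      | none => false
    else false

def is_consecutive_x_vars (var_names : List String) : Bool := pvGoA var_names []

-- ===== PORT B =====
-- the for-loop of B: one pass with seen-set and running lo/hi (None → Option).
def pvGoB : List String → PySem.Set Int → Option Int → Option Int → Bool
  | [], seen, lo, hi =>
    match lo, hi with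
    | some l, some h => h - l + 1 == (PySem.Set.len seen : Int)
    | _, _ => true
  | name :: rest, seen, lo, hi =>
    if PySem.Str.startswith name "x" then
      match PySem.Int.ofStr? (PySem.Str.slice name (some 1) none) with
      | some idx =>
        if idx ≥ 20 || PySem.Set.contains seen idx then false
        else
          pvGoB rest (PySem.Set.add seen idx)
            (match lo with
             | none => some idx
             | some l => if idx < l then some idx else some l)
            (match hi with
             | none => some idx
             | some h => if h < idx then some idx else some h)
      | none => false
    else false

def is_consecutive_x_vars_alt (var_names : List String) : Bool :=
  pvGoB var_names PySem.Set.empty none none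

-- ===== PRECONDITION & SPEC =====
def Spec_is_consecutive_x_vars (var_names : List String) (out : Bool) : Prop := out = is_consecutive_x_vars_alt var_names
instance (var_names : List String) (out : Bool) : Decidable (Spec_is_consecutive_x_vars var_names out) := by unfold Spec_is_consecutive_x_vars; infer_instance

-- ===== CLAIM (what is proved, stated in full; the proofs are below) =====
def Claim_equal_is_consecutive_x_vars : Prop := ∀ (var_names : List String), Dom_is_consecutive_x_vars var_names → Spec_is_consecutive_x_vars var_names (is_consecutive_x_vars var_names)

-- ===== LEMMAS AND PROOFS =====

-- A's index scan is the successor chain on the list.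
theorem pvChkA_iff (s : List Int) :
    pvChkA s = true ↔ List.IsChain (fun a b : Int => a + 1 = b) s := by
  unfold pvChkA
  rw [List.isChain_iff_getElem]
  simp only [PySem.List.pyRange_one, List.all_map, List.all_eq_true, List.mem_range,
    Function.comp_apply, zero_add]
  have hg : ∀ (j : Nat) (hj : j < s.length), PySem.List.pyGetD s (j : Int) 0 = s[j] := by
    intro j hj
    rw [PySem.List.pyGetD_natCast]
    exact List.getD_eq_getElem s 0 hj
  constructor
  · intro h i hi
    have := h i (by omega)
    rw [show ((i : Int) + 1) = ((i + 1 : Nat) : Int) by push_cast; ring,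
      hg i (by omega), hg (i + 1) hi] at this
    simpa using this
  · intro h k hk
    have hk' : k + 1 < s.length := by omega
    have := h k (by omega)
    rw [show ((k : Int) + 1) = ((k + 1 : Nat) : Int) by push_cast; ring,
      hg k (by omega), hg (k + 1) hk']
    simp [this]

theorem pvChain_nodup {s : List Int}
    (h : List.IsChain (fun a b : Int => a + 1 = b) s) : s.Nodup := by
  have h1 : List.IsChain (fun a b : Int => a < b) s := h.imp (fun hab => by omega)
  have h2 : s.Pairwise (fun a b : Int => a < b) :=
    (List.isChain_iff_pairwise (R := fun a b : Int => a < b)).mp h1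
  exact h2.imp (fun hab => by omega)

-- a strictly increasing list: last - head ≥ length - 1
theorem pvL0 : ∀ (t : List Int) (a M : Int), (a :: t).Pairwise (· < ·) →
    (a :: t).getLast? = some M → (t.length : Int) ≤ M - a := by
  intro t
  induction t with
  | nil => intro a M _ hM; simp at hM ⊢; omega
  | cons b t' ih =>
    intro a M hp hM
    have hab : a < b := (List.pairwise_cons.mp hp).1 b (by simp)
    rw [List.getLast?_cons_cons] at hM
    have := ih b M (List.pairwise_cons.mp hp).2 hM
    simp only [List.length_cons]
    push_cast
    omega

-- chain characterisation on a strictly increasing list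
theorem pvL1 : ∀ (t : List Int) (a M : Int), (a :: t).Pairwise (· < ·) →
    (a :: t).getLast? = some M →
    (List.IsChain (fun x y : Int => x + 1 = y) (a :: t) ↔
      M - a + 1 = ((a :: t).length : Int)) := by
  intro t
  induction t with
  | nil =>
    intro a M _ hM
    simp at hM
    simp [List.IsChain.singleton, hM]
  | cons b t' ih =>
    intro a M hp hM
    have hab : a < b := (List.pairwise_cons.mp hp).1 b (by simp)
    have hp' : (b :: t').Pairwise (· < ·) := (List.pairwise_cons.mp hp).2
    rw [List.getLast?_cons_cons] at hM
    have h0 := pvL0 t' b M hp' hM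
    have hih := ih b M hp' hM
    rw [List.isChain_cons_cons]
    simp only [List.length_cons] at hih ⊢
    constructor
    · rintro ⟨h1, h2⟩
      have := hih.mp h2
      push_cast at this ⊢
      omega
    · intro h
      push_cast at h
      have hb : a + 1 = b := by omega
      refine ⟨hb, hih.mpr ?_⟩
      push_cast
      omega

-- in a ≤-Pairwise list every element is ≤ the last
theorem pvL2 : ∀ (s : List Int) (M : Int), s.Pairwise (· ≤ ·) →
    s.getLast? = some M → ∀ y ∈ s, y ≤ M := by
  intro s
  induction s with
  | nil => intro M _ hM; simp at hM
  | cons a t ih =>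
    intro M hp hM y hy
    cases t with
    | nil =>
      simp at hM hy
      omega
    | cons b t' =>
      rw [List.getLast?_cons_cons] at hM
      rcases List.mem_cons.mp hy with rfl | hyt
      · have hbM : b ≤ M := ih M (List.pairwise_cons.mp hp).2 hM b (by simp)
        have : y ≤ b := (List.pairwise_cons.mp hp).1 b (by simp)
        omega
      · exact ih M (List.pairwise_cons.mp hp).2 hM y hyt

-- A's final check on a duplicate-free ids with min l and max h equals B's arithmetic test
theorem pvKey (ids : List Int) (hnd : ids.Nodup) (l h : Int)
    (hl : l ∈ ids) (hlle : ∀ y ∈ ids, l ≤ y)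
    (hh : h ∈ ids) (hhge : ∀ y ∈ ids, y ≤ h) :
    (List.IsChain (fun a b : Int => a + 1 = b) (PySem.List.sorted ids (fun x => x) false) ↔
      h - l + 1 = (ids.length : Int)) := by
  have hperm : (PySem.List.sorted ids (fun x => x) false).Perm ids :=
    PySem.List.sorted_perm ids (fun x => x) false
  have hsle : (PySem.List.sorted ids (fun x => x) false).Pairwise
      (fun a b : Int => a ≤ b) := PySem.List.sorted_pairwise ids (fun x => x)
  have hsnd : (PySem.List.sorted ids (fun x => x) false).Nodup := hperm.nodup_iff.mpr hnd
  have hslt : (PySem.List.sorted ids (fun x => x) false).Pairwise (fun a b : Int => a < b) :=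
    (hsle.and hsnd).imp (fun hab => lt_of_le_of_ne hab.1 hab.2)
  have hne : PySem.List.sorted ids (fun x => x) false ≠ [] := by
    intro hnil
    rw [hnil] at hperm
    rw [hperm.symm.eq_nil] at hl
    simp at hl
  obtain ⟨m, t, hmt⟩ := List.exists_cons_of_ne_nil hne
  cases hM : (m :: t).getLast? with
  | none => simp at hM
  | some M =>
  -- head of the sorted list is the minimum l
  have hmmin : ∀ y ∈ ids, m ≤ y := PySem.List.key_head_sorted_le ids (fun x => x) hmt
  have hm_ids : m ∈ ids := hperm.mem_iff.mp (by simp [hmt])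
  have hml : m = l := le_antisymm (hmmin l hl) (hlle m hm_ids)
  -- last of the sorted list is the maximum h
  have hM_mem : M ∈ (m :: t) := by
    obtain ⟨hne', hMeq⟩ := List.mem_getLast?_eq_getLast (l := m :: t) (x := M) (by simp [hM])
    rw [hMeq]; exact List.getLast_mem _
  have hM_ids : M ∈ ids := hperm.mem_iff.mp (by rw [hmt]; exact hM_mem)
  have hM_le : M ≤ h := hhge M hM_ids
  have hh_le : h ≤ M := by
    have hh_s : h ∈ m :: t := by rw [← hmt]; exact hperm.mem_iff.mpr hh
    exact pvL2 (m :: t) M (by rw [← hmt]; exact hsle) hM h hh_s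
  have hMh : M = h := le_antisymm hM_le hh_le
  have hlen : (m :: t).length = ids.length := by rw [← hmt]; exact hperm.length_eq
  rw [hmt]
  rw [pvL1 t m M (by rw [← hmt]; exact hslt) hM]
  rw [hMh, hlen, hml]

-- A returns False from a state whose accumulated ids already contain a duplicate
theorem pvA_dup : ∀ (names : List String) (ids : List Int),
    ¬ ids.Nodup → pvGoA names ids = false := by
  intro names
  induction names with
  | nil =>
    intro ids hdup
    have hperm : (PySem.List.sorted ids (fun x => x) false).Perm ids :=
      PySem.List.sorted_perm ids (fun x => x) false
    have hch : ¬ List.IsChain (fun a b : Int => a + 1 = b)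
        (PySem.List.sorted ids (fun x => x) false) :=
      fun hc => hdup (hperm.nodup_iff.mp (pvChain_nodup hc))
    simp only [pvGoA]
    rw [← Bool.not_eq_true]
    rw [pvChkA_iff]
    exact hch
  | cons name rest ih =>
    intro ids hdup
    simp only [pvGoA]
    split
    · cases hof : PySem.Int.ofStr? (PySem.Str.slice name (some 1) none) with
      | none => simp
      | some idx =>
        simp only
        split
        · rfl
        · apply ih
          intro hc
          exact hdup (hc.sublist (List.sublist_append_left ids [idx]))
    · rfl

-- loop invariant: B's state mirrors A's accumulated duplicate-free ids
theorem pvMain : ∀ (names : List String) (ids : List Int) (lo hi : Option Int),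
    ids.Nodup →
    (match lo with
     | none => ids = []
     | some l => l ∈ ids ∧ ∀ y ∈ ids, l ≤ y) →
    (match hi with
     | none => ids = []
     | some h => h ∈ ids ∧ ∀ y ∈ ids, y ≤ h) →
    pvGoA names ids = pvGoB names (PySem.Set.ofList ids) lo hi := by
  intro names
  induction names with
  | nil =>
    intro ids lo hi hnd hlo hhi
    cases lo with
    | none =>
      simp only at hlo
      subst hlo
      cases hi with
      | none => simp [pvGoA, pvGoB, pvChkA, PySem.List.pyRange]
      | some h => simp at hhi
    | some l =>
      cases hi with
      | none =>
        simp only at hhi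
        subst hhi
        simp at hlo
      | some h =>
        obtain ⟨hl, hlle⟩ := hlo
        obtain ⟨hh, hhge⟩ := hhi
        simp only [pvGoA, pvGoB]
        rw [Bool.eq_iff_iff, pvChkA_iff, pvKey ids hnd l h hl hlle hh hhge]
        simp [PySem.Set.ofList_eq_self_of_nodup ids hnd, PySem.Set.len]
  | cons name rest ih =>
    intro ids lo hi hnd hlo hhi
    simp only [pvGoA, pvGoB]
    split
    · cases hof : PySem.Int.ofStr? (PySem.Str.slice name (some 1) none) with
      | none => simp
      | some idx =>
        simp only
        by_cases h20 : idx ≥ 20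
        · simp [h20]
        · simp only [h20, if_false]
          by_cases hmem : idx ∈ ids
          · have hcon : PySem.Set.contains (PySem.Set.ofList ids) idx = true := by
              rw [PySem.Set.contains_iff, PySem.Set.mem_ofList]; exact hmem
            rw [hcon, if_pos (by simp : ((decide False || true) = true))]
            apply pvA_dup
            intro hc
            have hsp := (List.nodup_append (l₁ := ids) (l₂ := [idx])).mp hc
            exact hsp.2.2 idx hmem idx (by simp) rfl
          · have hcon : PySem.Set.contains (PySem.Set.ofList ids) idx = false := by
              rw [← Bool.not_eq_true, PySem.Set.contains_iff, PySem.Set.mem_ofList]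
              exact hmem
            rw [hcon, if_neg (by simp : ¬ ((decide False || false) = true))]
            have hnd' : (ids ++ [idx]).Nodup := by
              rw [List.nodup_append]
              refine ⟨hnd, List.nodup_singleton idx, ?_⟩
              intro a ha b hb
              simp at hb
              subst hb
              exact fun hc => hmem (hc ▸ ha)
            have hadd : PySem.Set.add (PySem.Set.ofList ids) idx =
                PySem.Set.ofList (ids ++ [idx]) :=
              (PySem.Set.ofList_append_singleton (xs := ids) (x := idx)).symm
            rw [hadd]
            apply ih _ _ _ hnd'
            · cases lo with
              | none =>
                simp only at hlo; subst hlo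
                simp
              | some l =>
                obtain ⟨hl, hlle⟩ := hlo
                by_cases hlt : idx < l <;> simp only [hlt, if_true, if_false]
                · refine ⟨by simp, ?_⟩
                  intro y hy
                  rcases List.mem_append.mp hy with hy | hy
                  · exact le_trans (by omega) (hlle y hy)
                  · simp at hy; omega
                · refine ⟨List.mem_append.mpr (Or.inl hl), ?_⟩
                  intro y hy
                  rcases List.mem_append.mp hy with hy | hy
                  · exact hlle y hy
                  · simp at hy; omega
            · cases hi with
              | none =>
                simp only at hhi; subst hhi
                simp
              | some h =>
                obtain ⟨hh, hhge⟩ := hhi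
                by_cases hgt : h < idx <;> simp only [hgt, if_true, if_false]
                · refine ⟨by simp, ?_⟩
                  intro y hy
                  rcases List.mem_append.mp hy with hy | hy
                  · exact le_trans (hhge y hy) (by omega)
                  · simp at hy; omega
                · refine ⟨List.mem_append.mpr (Or.inl hh), ?_⟩
                  intro y hy
                  rcases List.mem_append.mp hy with hy | hy
                  · exact hhge y hy
                  · simp at hy; omega
    · rfl

-- ===== VERDICT (by name: the statement is the Claim_ definition above) =====
theorem is_consecutive_x_vars_spec : Claim_equal_is_consecutive_x_vars := by
  intro var_names _
  unfold Spec_is_consecutive_x_vars is_consecutive_x_vars is_consecutive_x_vars_alt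
  have := pvMain var_names [] none none (by simp) (by simp) (by simp)
  simpa [PySem.Set.ofList, PySem.Set.empty] using this
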